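-- pv_equiv track=rewrite | github.com/JeiKeiLim/TIL | coding_test/leetcode/3607_Power_Grid_Maintenance.py | powerGridMaintenance2
-- ===== SOURCE A (Python) =====
-- from typing import List
-- import heapq
-- import heapq
--
-- def powerGridMaintenance2(
--     c: int, connections: List[List[int]], queries: List[List[int]]
-- ) -> List[int]:
--     parent = list(range(c + 1))
--
--     def find(i):
--         if parent[i] == i:
--             return i
--         parent[i] = find(parent[i])
--         return parent[i]
--
--     def union(i, j):
--         root_i = find(i)
--         root_j = find(j)
--         if root_i != root_j:
--             parent[root_j] = root_i
--
--     for u, v in connections: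
--         union(u, v)
--
--     component_heaps = {}
--     for i in range(1, c + 1):
--         root = find(i)
--         if root not in component_heaps:
--             component_heaps[root] = []
--         heapq.heappush(component_heaps[root], i)
--
--     is_online = [True] * (c + 1)
--     results = []
--
--     for op, station_id in queries:
--         if op == 2:
--             is_online[station_id] = False
--         else:
--             if is_online[station_id]:
--                 results.append(station_id)
--                 continue
--
--             root = find(station_id)
--             heap = component_heaps.get(root)
--
--             while heap and not is_online[heap[0]]:
--                 heapq.heappop(heap)
--
--             if heap:
--                 results.append(heap[0])
--             else:
--                 results.append(-1)
--
--     return results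
-- ===== SOURCE B (Python) =====
-- from typing import List
--
--
-- def powerGridMaintenance2(
--     c: int, connections: List[List[int]], queries: List[List[int]]
-- ) -> List[int]:
--     parent = list(range(c + 1))
--
--     def find(i):
--         if parent[i] == i:
--             return i
--         parent[i] = find(parent[i])
--         return parent[i]
--
--     for u, v in connections:
--         ru, rv = find(u), find(v)
--         if ru != rv:
--             parent[rv] = ru
--
--     # each component as a static ascending member list (built once, never mutated)
--     members = {}
--     for i in range(1, c + 1):
--         members.setdefault(find(i), []).append(i)
--
--     is_online = [True] * (c + 1)
--     results = []
--     for op, station_id in queries: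
--         if op == 2:
--             is_online[station_id] = False
--         elif is_online[station_id]:
--             results.append(station_id)
--         else:
--             comp = members.get(find(station_id), [])
--             results.append(next((x for x in comp if is_online[x]), -1))
--     return results
-- ===== Notes on version B (the rewrite author's own statement) =====
-- stated objective: simpler
-- what changed: A answers each query from per-component binary heaps with lazy deletion of offline stations (heappush/heappop mutation); B builds each component's member list once, in ascending order, and answers a query by scanning that static list for the first currently-online station, so the heaps and the lazy-pop loop disappear.
import Mathlib
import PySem

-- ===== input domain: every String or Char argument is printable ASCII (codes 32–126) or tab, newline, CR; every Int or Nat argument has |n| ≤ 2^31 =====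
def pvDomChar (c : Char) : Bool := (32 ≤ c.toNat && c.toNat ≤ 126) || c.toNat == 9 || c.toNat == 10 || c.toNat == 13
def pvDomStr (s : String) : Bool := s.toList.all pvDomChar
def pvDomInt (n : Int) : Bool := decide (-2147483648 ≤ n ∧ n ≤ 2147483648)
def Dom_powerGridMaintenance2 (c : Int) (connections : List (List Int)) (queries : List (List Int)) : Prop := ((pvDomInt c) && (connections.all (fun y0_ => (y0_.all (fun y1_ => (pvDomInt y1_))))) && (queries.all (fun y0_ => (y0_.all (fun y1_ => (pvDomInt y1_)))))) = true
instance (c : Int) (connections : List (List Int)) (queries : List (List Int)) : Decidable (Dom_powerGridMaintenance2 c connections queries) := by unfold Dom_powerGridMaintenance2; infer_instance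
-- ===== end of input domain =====

-- B replaces A's per-component lazy-deletion heaps by static sorted member lists scanned for the
-- first online station (objective: simpler).  Both Pythons mutate only their own local state.

-- ===== PORT A =====
-- shared union-find helper: the recursive path-compressing `find` of BOTH Pythons (identical there).
-- fuel bounds the recursion depth; `p.length + 1` never runs out on states A/B actually build.
def pvFindAux (fuel : Nat) (p : List Int) (i : Int) : List Int × Int :=
  match fuel with
  | 0 => (p, i)                                   -- unreachable with fuel = p.length + 1
  | fuel + 1 =>
    match PySem.List.pyGet? p i with
    | none => (p, i)                              -- IndexError; excluded by Pre_
    | some v =>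
      if v == i then (p, i)
      else
        let pr := pvFindAux fuel p v
        (PySem.List.pySetD pr.1 i pr.2, pr.2)     -- parent[i] = find(parent[i]); return parent[i]

def pvFind (p : List Int) (i : Int) : List Int × Int := pvFindAux (p.length + 1) p i

-- A's `union(i, j)`
def pvUnion (p : List Int) (u v : Int) : List Int :=
  let pr1 := pvFind p u
  let pr2 := pvFind pr1.1 v
  if pr2.2 == pr1.2 then pr2.1 else PySem.List.pySetD pr2.1 pr2.2 pr1.2

-- heapq heap ported as an ordered list: heappush = ordered insert, heappop = drop the head.
-- Exact for everything A observes of a heap (heap[0] = the minimum, emptiness, the multiset of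
-- elements); during the build phase keys are pushed in increasing order, so the list even equals
-- CPython's underlying heap list.
def pvHeappush (h : List Int) (x : Int) : List Int :=
  match h with
  | [] => [x]
  | y :: t => if x < y then x :: y :: t else y :: pvHeappush t x

-- A's `while heap and not is_online[heap[0]]: heappop(heap)`
def pvClean (online : List Bool) : List Int → List Int
  | [] => []
  | x :: t =>
    match PySem.List.pyGet? online x with
    | some b => if b then x :: t else pvClean online t
    | none => x :: t                              -- IndexError; unreachable for built heaps

-- A's component_heaps build loop
def pvBuildHeaps (c : Int) (st : List Int × PySem.Dict Int (List Int)) :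
    List Int × PySem.Dict Int (List Int) :=
  (PySem.List.pyRange 1 (c + 1) 1).foldl
    (fun st i =>
      let pr := pvFind st.1 i
      let d := if st.2.contains pr.2 then st.2 else st.2.insert pr.2 []
      (pr.1, d.insert pr.2 (pvHeappush (d.getD pr.2 []) i)))
    st

-- A's query loop body
def pvQueryA (st : List Int × PySem.Dict Int (List Int) × List Bool × List Int)
    (q : List Int) : List Int × PySem.Dict Int (List Int) × List Bool × List Int :=
  match q with
  | [op, station] =>
    let (p, d, online, res) := st
    if op == 2 then (p, d, PySem.List.pySetD online station false, res)
    else if PySem.List.pyGetD online station true then (p, d, online, res ++ [station])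
    else
      let pr := pvFind p station
      match d.get? pr.2 with
      | none => (pr.1, d, online, res ++ [-1])
      | some h =>
        let h' := pvClean online h
        (pr.1, d.insert pr.2 h', online,
          res ++ [match h' with | [] => -1 | y :: _ => y])
  | _ => st                                       -- ValueError on unpacking; excluded by Pre_

def powerGridMaintenance2 (c : Int) (connections : List (List Int)) (queries : List (List Int)) : List Int :=
  let parent := PySem.List.pyRange 0 (c + 1) 1
  let parent := connections.foldl
    (fun p r => match r with | [u, v] => pvUnion p u v | _ => p) parent
  let st := pvBuildHeaps c (parent, PySem.Dict.empty)
  let online := List.replicate (c + 1).toNat true       -- [True] * (c + 1)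
  (queries.foldl pvQueryA (st.1, st.2, online, [])).2.2.2

-- ===== PORT B =====
-- B's members build loop: members.setdefault(find(i), []).append(i)
def pvBuildMembers (c : Int) (st : List Int × PySem.Dict Int (List Int)) :
    List Int × PySem.Dict Int (List Int) :=
  (PySem.List.pyRange 1 (c + 1) 1).foldl
    (fun st i =>
      let pr := pvFind st.1 i
      (pr.1, st.2.insert pr.2 (st.2.getD pr.2 [] ++ [i])))
    st

-- B's `next((x for x in comp if is_online[x]), -1)`
def pvFirstOnline (online : List Bool) : List Int → Int
  | [] => -1
  | x :: t => if PySem.List.pyGetD online x false then x else pvFirstOnline online t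

-- B's query loop body (members is never mutated)
def pvQueryB (members : PySem.Dict Int (List Int)) (st : List Int × List Bool × List Int)
    (q : List Int) : List Int × List Bool × List Int :=
  match q with
  | [op, station] =>
    let (p, online, res) := st
    if op == 2 then (p, PySem.List.pySetD online station false, res)
    else if PySem.List.pyGetD online station true then (p, online, res ++ [station])
    else
      let pr := pvFind p station
      (pr.1, online, res ++ [pvFirstOnline online (members.getD pr.2 [])])
  | _ => st                                       -- ValueError on unpacking; excluded by Pre_

def powerGridMaintenance2_alt (c : Int) (connections : List (List Int)) (queries : List (List Int)) : List Int :=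
  let parent := PySem.List.pyRange 0 (c + 1) 1
  let parent := connections.foldl
    (fun p r =>
      match r with
      | [u, v] =>
        let pr1 := pvFind p u
        let pr2 := pvFind pr1.1 v
        if pr1.2 ≠ pr2.2 then PySem.List.pySetD pr2.1 pr2.2 pr1.2 else pr2.1
      | _ => p) parent
  let st := pvBuildMembers c (parent, PySem.Dict.empty)
  let online := List.replicate (c + 1).toNat true
  (queries.foldl (pvQueryB st.2) (st.1, online, [])).2.2

-- ===== PRECONDITION & SPEC =====
-- Pre_ excludes exactly the inputs on which A raises: a connection or query row that is not a
-- pair (ValueError on unpacking), or a station/connection id outside Python's list-index range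
-- [-(c+1), c] of the parent/is_online lists (IndexError).
def Pre_powerGridMaintenance2 (c : Int) (connections : List (List Int)) (queries : List (List Int)) : Prop :=
  (∀ r ∈ connections, r.length = 2 ∧ ∀ x ∈ r, -(c + 1) ≤ x ∧ x ≤ c) ∧
  (∀ r ∈ queries, r.length = 2 ∧ ∀ x ∈ r.drop 1, -(c + 1) ≤ x ∧ x ≤ c)
instance (c : Int) (connections : List (List Int)) (queries : List (List Int)) : Decidable (Pre_powerGridMaintenance2 c connections queries) := by unfold Pre_powerGridMaintenance2; infer_instance

def pvWitness_powerGridMaintenance2 : Int × List (List Int) × List (List Int) :=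
  (3, [[1, 2]], [[1, 1], [2, 1], [1, 1], [1, 3]])

def Spec_powerGridMaintenance2 (c : Int) (connections : List (List Int)) (queries : List (List Int)) (out : List Int) : Prop := out = powerGridMaintenance2_alt c connections queries
instance (c : Int) (connections : List (List Int)) (queries : List (List Int)) (out : List Int) : Decidable (Spec_powerGridMaintenance2 c connections queries out) := by unfold Spec_powerGridMaintenance2; infer_instance

-- ===== CLAIM (what is proved, stated in full; the proofs are below) =====
def Claim_equal_powerGridMaintenance2 : Prop := ∀ (c : Int) (connections : List (List Int)) (queries : List (List Int)), Dom_powerGridMaintenance2 c connections queries → Pre_powerGridMaintenance2 c connections queries → Spec_powerGridMaintenance2 c connections queries (powerGridMaintenance2 c connections queries)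

-- ===== LEMMAS AND PROOFS =====

theorem pvGetD_of_get? {l : List Bool} {x : Int} {b : Bool} (d : Bool)
    (h : PySem.List.pyGet? l x = some b) : PySem.List.pyGetD l x d = b := by
  unfold PySem.List.pyGetD; rw [h]; rfl

theorem pvSetFalse (l : List Bool) (i x : Int) (h : PySem.List.pyGet? l x = some false) :
    PySem.List.pyGet? (PySem.List.pySetD l i false) x = some false := by
  unfold PySem.List.pySetD PySem.List.pySet?
  cases hk : PySem.List.pyIdx? l.length i with
  | none => simpa [hk] using h
  | some k =>
    simp only [Option.map_some, Option.getD_some]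
    unfold PySem.List.pyGet? at h ⊢
    rw [List.length_set]
    cases hj : PySem.List.pyIdx? l.length x with
    | none => rw [hj] at h; simp at h
    | some j =>
      rw [hj] at h
      simp only [Option.bind_some] at h ⊢
      have hlt : j < l.length := (List.getElem?_eq_some_iff.mp h).1
      rw [List.getElem?_set]
      split_ifs with he hl
      · rfl
      · omega
      · exact h

theorem pvClean_spec (online : List Bool) (h : List Int)
    (hin : ∀ x ∈ h, (PySem.List.pyGet? online x).isSome) :
    ∃ pre, h = pre ++ pvClean online h ∧
      (∀ x ∈ pre, PySem.List.pyGet? online x = some false) ∧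
      (∀ y s, pvClean online h = y :: s → PySem.List.pyGet? online y = some true) := by
  induction h with
  | nil => exact ⟨[], rfl, by simp, by intro y s hy; simp [pvClean] at hy⟩
  | cons x t ih =>
    cases hg : PySem.List.pyGet? online x with
    | none => exact absurd (hin x (by simp)) (by simp [hg])
    | some b =>
      cases b with
      | false =>
        obtain ⟨pre, h1, h2, h3⟩ := ih (fun y hy => hin y (by simp [hy]))
        have hcl : pvClean online (x :: t) = pvClean online t := by simp [pvClean, hg]
        refine ⟨x :: pre, ?_, ?_, ?_⟩
        · rw [hcl]; simpa using congrArg (x :: ·) h1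
        · intro z hz
          rcases List.mem_cons.1 hz with rfl | hz
          · exact hg
          · exact h2 z hz
        · intro y s hy; exact h3 y s (hcl ▸ hy)
      | true =>
        have hcl : pvClean online (x :: t) = x :: t := by simp [pvClean, hg]
        refine ⟨[], by simp [hcl], by simp, ?_⟩
        intro y s hy
        rw [hcl] at hy
        cases hy
        exact hg

theorem pvFirstOnline_append (online : List Bool) (pre rest : List Int)
    (hp : ∀ x ∈ pre, PySem.List.pyGet? online x = some false) :
    pvFirstOnline online (pre ++ rest) = pvFirstOnline online rest := by
  induction pre with
  | nil => rfl
  | cons x t ih =>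
    have : PySem.List.pyGetD online x false = false := pvGetD_of_get? false (hp x (by simp))
    simp only [List.cons_append, pvFirstOnline, this, Bool.false_eq_true, if_false]
    exact ih (fun z hz => hp z (by simp [hz]))

theorem pvHeappush_append (v : List Int) (x : Int) (h : ∀ y ∈ v, y < x) :
    pvHeappush v x = v ++ [x] := by
  induction v with
  | nil => rfl
  | cons y t ih =>
    have hy : y < x := h y (by simp)
    simp only [pvHeappush, if_neg (by omega : ¬ x < y), List.cons_append]
    exact congrArg (y :: ·) (ih (fun z hz => h z (by simp [hz])))

theorem connStep_eq :
    (fun (p : List Int) (r : List Int) => match r with | [u, v] => pvUnion p u v | _ => p) =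
    (fun (p : List Int) (r : List Int) =>
      match r with
      | [u, v] =>
        let pr1 := pvFind p u
        let pr2 := pvFind pr1.1 v
        if pr1.2 ≠ pr2.2 then PySem.List.pySetD pr2.1 pr2.2 pr1.2 else pr2.1
      | _ => p) := by
  funext p r
  match r with
  | [] => rfl
  | [_] => rfl
  | [u, v] =>
    show pvUnion p u v = _
    unfold pvUnion
    by_cases h : (pvFind (pvFind p u).1 v).2 = (pvFind p u).2
    · simp [h]
    · simp [h, Ne.symm h]
  | _ :: _ :: _ :: _ => rfl

def pvBuildA (l : List Int) (st : List Int × PySem.Dict Int (List Int)) :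
    List Int × PySem.Dict Int (List Int) :=
  l.foldl
    (fun st i =>
      let pr := pvFind st.1 i
      let d := if st.2.contains pr.2 then st.2 else st.2.insert pr.2 []
      (pr.1, d.insert pr.2 (pvHeappush (d.getD pr.2 []) i)))
    st

def pvBuildB (l : List Int) (st : List Int × PySem.Dict Int (List Int)) :
    List Int × PySem.Dict Int (List Int) :=
  l.foldl
    (fun st i =>
      let pr := pvFind st.1 i
      (pr.1, st.2.insert pr.2 (st.2.getD pr.2 [] ++ [i])))
    st

theorem pvBuild_eq (n : Nat) : ∀ (a b : Int), (b - a).toNat = n →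
    ∀ (p : List Int) (d : PySem.Dict Int (List Int)),
    (∀ r x, x ∈ d.getD r [] → x < a) →
    pvBuildA (PySem.List.pyRange a b 1) (p, d) = pvBuildB (PySem.List.pyRange a b 1) (p, d) := by
  induction n with
  | zero =>
    intro a b hn p d _
    rw [PySem.List.pyRange_one_eq_nil (by omega)]
    rfl
  | succ n ih =>
    intro a b hn p d hinv
    rw [PySem.List.pyRange_one_cons (by omega)]
    unfold pvBuildA pvBuildB
    simp only [List.foldl_cons]
    have hstep :
        (let pr := pvFind p a
         let d' := if d.contains pr.2 then d else d.insert pr.2 []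
         ((pr.1 : List Int), d'.insert pr.2 (pvHeappush (d'.getD pr.2 []) a))) =
        (let pr := pvFind p a
         (pr.1, d.insert pr.2 (d.getD pr.2 [] ++ [a]))) := by
      show _ = ((pvFind p a).1, d.insert (pvFind p a).2 (d.getD (pvFind p a).2 [] ++ [a]))
      by_cases hc : d.contains (pvFind p a).2
      · simp only [hc, if_true]
        rw [pvHeappush_append _ _ (fun y hy => hinv _ y hy)]
      · simp only [hc, if_false, Bool.false_eq_true]
        rw [PySem.Dict.getD_insert_self, PySem.Dict.getD_of_not_contains _ _ (by simpa using hc)]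
        rw [show pvHeappush [] a = [a] from rfl, PySem.Dict.insert_insert_self]
        rfl
    rw [hstep]
    show pvBuildA _ _ = pvBuildB _ _
    refine ih (a + 1) b (by omega) _ _ ?_
    intro r x hx
    rcases eq_or_ne r (pvFind p a).2 with rfl | hne
    · rw [PySem.Dict.getD_insert_self] at hx
      rcases List.mem_append.1 hx with hx | hx
      · exact lt_trans (hinv _ x hx) (by omega)
      · simp at hx; omega
    · rw [PySem.Dict.getD_insert_of_ne] at hx
      · exact lt_trans (hinv r x hx) (by omega)
      · exact hne

theorem pvBuildB_mem : ∀ (l : List Int) (p : List Int) (d : PySem.Dict Int (List Int)) (r x : Int),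
    x ∈ (pvBuildB l (p, d)).2.getD r [] → x ∈ d.getD r [] ∨ x ∈ l := by
  intro l
  induction l with
  | nil => intro p d r x hx; exact Or.inl hx
  | cons i t ih =>
    intro p d r x hx
    unfold pvBuildB at hx
    simp only [List.foldl_cons] at hx
    rcases ih _ _ r x hx with hx | hx
    · rcases eq_or_ne r (pvFind p i).2 with rfl | hne
      · rw [PySem.Dict.getD_insert_self] at hx
        rcases List.mem_append.1 hx with hx | hx
        · exact Or.inl hx
        · simp at hx; simp [hx]
      · rw [PySem.Dict.getD_insert_of_ne _ _ _ hne] at hx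
        exact Or.inl hx
    · simp [hx]

def pvRel (d m : PySem.Dict Int (List Int)) (online : List Bool) : Prop :=
  ∀ r, match d.get? r with
    | none => m.getD r [] = []
    | some h => ∃ pre, m.getD r [] = pre ++ h ∧
        ∀ x ∈ pre, PySem.List.pyGet? online x = some false

theorem queryFold_eq (c : Int) (m : PySem.Dict Int (List Int))
    (hm : ∀ r x, x ∈ m.getD r [] → 1 ≤ x ∧ x ≤ c) :
    ∀ (queries : List (List Int)),
    (∀ r ∈ queries, r.length = 2 ∧ ∀ x ∈ r.drop 1, -(c + 1) ≤ x ∧ x ≤ c) →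
    ∀ (p : List Int) (d : PySem.Dict Int (List Int)) (online : List Bool) (res : List Int),
    online.length = (c + 1).toNat →
    pvRel d m online →
    (queries.foldl pvQueryA (p, d, online, res)).2.2.2 =
    (queries.foldl (pvQueryB m) (p, online, res)).2.2 := by
  intro queries
  induction queries with
  | nil => intro _ p d online res _ _; rfl
  | cons q qs ih =>
    intro hq p d online res hlen hrel
    obtain ⟨hq1, hq2⟩ := hq q (by simp)
    have hqs : ∀ r ∈ qs, r.length = 2 ∧ ∀ x ∈ r.drop 1, -(c + 1) ≤ x ∧ x ≤ c :=
      fun r hr => hq r (by simp [hr])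
    obtain ⟨op, s, rfl⟩ : ∃ op s, q = [op, s] := by
      match q, hq1 with
      | [op, s], _ => exact ⟨op, s, rfl⟩
    -- the in-range fact for members, under the current online list
    have hmem_in : ∀ x : Int, 1 ≤ x → x ≤ c → (PySem.List.pyGet? online x).isSome := by
      intro x h1 h2
      rcases ho : PySem.List.pyGet? online x with _ | b
      · rw [PySem.List.pyGet?_eq_none_iff] at ho
        exfalso; apply ho
        constructor <;> [skip; skip] <;> rw [hlen] <;> omega
      · rfl
    simp only [List.foldl_cons]
    by_cases hop : op == 2
    · -- op == 2
      simp only [pvQueryA, pvQueryB, hop, if_true]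
      apply ih hqs
      · rw [PySem.List.length_pySetD]; exact hlen
      · intro r
        have := hrel r
        cases hg : d.get? r with
        | none => rw [hg] at this; exact this
        | some h =>
          rw [hg] at this
          obtain ⟨pre, h1, h2⟩ := this
          exact ⟨pre, h1, fun x hx => pvSetFalse _ _ _ (h2 x hx)⟩
    · simp only [pvQueryA, pvQueryB, hop, if_false, Bool.false_eq_true]
      by_cases hon : PySem.List.pyGetD online s true = true
      · simp only [hon, if_true]
        exact ih hqs _ _ _ _ hlen hrel
      · simp only [hon, if_false, Bool.false_eq_true]
        have := hrel (pvFind p s).2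
        cases hg : d.get? (pvFind p s).2 with
        | none =>
          rw [hg] at this
          rw [show pvFirstOnline online (m.getD (pvFind p s).2 []) = -1 by rw [this]; rfl]
          exact ih hqs _ _ _ _ hlen hrel
        | some h =>
          rw [hg] at this
          obtain ⟨pre0, hsplit, hpre0⟩ := this
          have hhin : ∀ x ∈ h, (PySem.List.pyGet? online x).isSome := by
            intro x hx
            have : x ∈ m.getD (pvFind p s).2 [] := by rw [hsplit]; exact List.mem_append_right _ hx
            obtain ⟨h1, h2⟩ := hm _ x this
            exact hmem_in x h1 h2
          obtain ⟨pre1, hdec, hpre1, hhead⟩ := pvClean_spec online h hhin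
          have hans : pvFirstOnline online (m.getD (pvFind p s).2 []) =
              (match pvClean online h with | [] => -1 | y :: _ => y) := by
            have hfo : pvFirstOnline online (m.getD (pvFind p s).2 []) =
                pvFirstOnline online (pvClean online h) := by
              rw [hsplit, pvFirstOnline_append online pre0 _ hpre0]
              conv_lhs => rw [hdec]
              rw [pvFirstOnline_append online pre1 _ hpre1]
            rw [hfo]
            cases hcl : pvClean online h with
            | nil => rfl
            | cons y t =>
              have : PySem.List.pyGetD online y false = true :=
                pvGetD_of_get? false (hhead y t hcl)
              simp [pvFirstOnline, this]
          rw [hans]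
          apply ih hqs _ _ _ _ hlen
          intro r
          rcases eq_or_ne r (pvFind p s).2 with rfl | hne
          · rw [PySem.Dict.get?_insert_self]
            refine ⟨pre0 ++ pre1, ?_, ?_⟩
            · rw [hsplit]
              conv_lhs => rw [hdec]
              rw [List.append_assoc]
            · intro x hx
              rcases List.mem_append.1 hx with hx | hx
              · exact hpre0 x hx
              · exact hpre1 x hx
          · rw [PySem.Dict.get?_insert_of_ne _ _ hne]
            exact hrel r


theorem buildHeaps_eq_A (c : Int) (st : List Int × PySem.Dict Int (List Int)) :
    pvBuildHeaps c st = pvBuildA (PySem.List.pyRange 1 (c + 1) 1) st := rfl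

theorem buildMembers_eq_B (c : Int) (st : List Int × PySem.Dict Int (List Int)) :
    pvBuildMembers c st = pvBuildB (PySem.List.pyRange 1 (c + 1) 1) st := rfl

-- ===== VERDICT (by name: the statement is the Claim_ definition above) =====
theorem powerGridMaintenance2_spec : Claim_equal_powerGridMaintenance2 := by
  intro c connections queries _hdom hpre
  obtain ⟨-, hq⟩ := hpre
  show powerGridMaintenance2 c connections queries = powerGridMaintenance2_alt c connections queries
  simp only [powerGridMaintenance2, powerGridMaintenance2_alt]
  rw [← connStep_eq]
  have hb : pvBuildHeaps c
        (connections.foldl (fun p r => match r with | [u, v] => pvUnion p u v | _ => p)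
          (PySem.List.pyRange 0 (c + 1) 1), PySem.Dict.empty) =
      pvBuildMembers c
        (connections.foldl (fun p r => match r with | [u, v] => pvUnion p u v | _ => p)
          (PySem.List.pyRange 0 (c + 1) 1), PySem.Dict.empty) := by
    rw [buildHeaps_eq_A, buildMembers_eq_B]
    refine pvBuild_eq (c + 1 - 1).toNat 1 (c + 1) rfl _ _ ?_
    intro r x hx
    rw [PySem.Dict.getD_empty] at hx
    cases hx
  rw [hb]
  have hm : ∀ r x, x ∈ (pvBuildMembers c
        (connections.foldl (fun p r => match r with | [u, v] => pvUnion p u v | _ => p)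
          (PySem.List.pyRange 0 (c + 1) 1), PySem.Dict.empty)).2.getD r [] →
      1 ≤ x ∧ x ≤ c := by
    intro r x hx
    rw [buildMembers_eq_B] at hx
    rcases pvBuildB_mem _ _ _ r x hx with hx | hx
    · rw [PySem.Dict.getD_empty] at hx; cases hx
    · have := PySem.List.mem_pyRange_one.1 hx
      omega
  refine queryFold_eq c _ hm queries hq _ _ _ [] (by simp) ?_
  intro r
  cases hg : (pvBuildMembers c
      (connections.foldl (fun p r => match r with | [u, v] => pvUnion p u v | _ => p)
        (PySem.List.pyRange 0 (c + 1) 1), PySem.Dict.empty)).2.get? r with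
  | none => exact PySem.Dict.getD_of_get?_eq_none _ _ hg
  | some h =>
    exact ⟨[], by rw [PySem.Dict.getD_of_get?_eq_some _ _ hg]; rfl, by simp⟩
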